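-- pv_equiv track=rewrite | github.com/RussellFeinstein/DiscordPermissionsManager | cogs/admin.py | _desc_sections
-- ===== SOURCE A (Python) =====
-- def _desc_sections(title: str, lines: list[str], hint: str = "") -> list[str]:
--     """Return one or more description-block strings for a status section.
--
--     Each block starts with a '## __Title__' heading (renders at heading size in
--     Discord embed descriptions).  If content exceeds MAX_CONTENT chars the section
--     is split into continuation blocks labelled '## __Title (cont.)__'.
--     The hint (italic) is appended only to the last block.
--     """
--     hint_text = f"\n*{hint}*" if hint else ""
--     if not lines:
--         return [f"## __{title}__\n*(none)*{hint_text}"]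
--     MAX_CONTENT = 3500  # leaves headroom inside Discord's 4096-char description limit
--     blocks: list[str] = []
--     chunk: list[str] = []
--     chars = 0
--     first = True
--     for line in lines:
--         if chars + len(line) + 1 > MAX_CONTENT and chunk:
--             t = title if first else f"{title} (cont.)"
--             blocks.append(f"## __{t}__\n" + "\n".join(chunk))
--             first, chunk, chars = False, [], 0
--         chunk.append(line)
--         chars += len(line) + 1
--     if chunk:
--         t = title if first else f"{title} (cont.)"
--         blocks.append(f"## __{t}__\n" + "\n".join(chunk) + hint_text)
--     return blocks
-- ===== SOURCE B (Python) =====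
-- def _render_blocks(title, groups, hint_text, first=True):
--     head = f"## __{title}__\n" if first else f"## __{title} (cont.)__\n"
--     body = head + "\n".join(groups[0])
--     if len(groups) == 1:
--         return [body + hint_text]
--     return [body] + _render_blocks(title, groups[1:], hint_text, False)
--
--
-- def _desc_sections(title: str, lines: list[str], hint: str = "") -> list[str]:
--     hint_text = f"\n*{hint}*" if hint else ""
--     MAX_CONTENT = 3500
--     groups, cur, chars = [], [], 0
--     for line in lines:
--         if cur and chars + len(line) + 1 > MAX_CONTENT:
--             groups.append(cur)
--             cur, chars = [], 0
--         cur.append(line)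
--         chars += len(line) + 1
--     if cur:
--         groups.append(cur)
--     if not groups:
--         return [f"## __{title}__\n*(none)*{hint_text}"]
--     return _render_blocks(title, groups, hint_text)
-- ===== Notes on version B (the rewrite author's own statement) =====
-- stated objective: alternative
-- what changed: A renders blocks inline inside the greedy loop with a 'first' flag and a trailing flush; B separates concerns into a grouping pass that only collects lists of lines and a recursive renderer that titles the first group, labels the rest '(cont.)', and appends the hint at its last-group base case.
import Mathlib
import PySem

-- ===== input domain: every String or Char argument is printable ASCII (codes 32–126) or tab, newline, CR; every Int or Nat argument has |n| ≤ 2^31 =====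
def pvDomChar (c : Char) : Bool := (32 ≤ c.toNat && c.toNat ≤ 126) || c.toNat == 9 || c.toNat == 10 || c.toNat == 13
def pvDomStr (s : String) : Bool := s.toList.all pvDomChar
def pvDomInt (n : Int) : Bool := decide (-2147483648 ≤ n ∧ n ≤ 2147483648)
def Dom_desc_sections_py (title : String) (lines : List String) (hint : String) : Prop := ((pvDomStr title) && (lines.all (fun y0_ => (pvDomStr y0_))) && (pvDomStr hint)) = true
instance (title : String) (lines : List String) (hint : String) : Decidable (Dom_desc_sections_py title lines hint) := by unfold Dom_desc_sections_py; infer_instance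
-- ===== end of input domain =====

-- B replaces A's single loop (which renders blocks inline, tracking a 'first' flag and doing a
-- trailing flush) by a grouping pass that only collects lists of lines plus a recursive renderer
-- that appends the hint at its last-group base case; objective: alternative decomposition.

-- ===== PORT A =====
-- loop body of A's 'for line in lines'; state = (blocks, chunk, chars, first)
def descA_step (title : String) (st : List String × List String × Int × Bool) (line : String) :
    List String × List String × Int × Bool :=
  let st2 :=
    if st.2.2.1 + PySem.Str.len line + 1 > 3500 ∧ st.2.1 ≠ [] then
      let t := if st.2.2.2 then title else title ++ " (cont.)"
      (st.1 ++ ["## __" ++ t ++ "__\n" ++ PySem.Str.join "\n" st.2.1], ([] : List String), (0 : Int), false)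
    else st
  (st2.1, st2.2.1 ++ [line], st2.2.2.1 + PySem.Str.len line + 1, st2.2.2.2)

def desc_sections_py (title : String) (lines : List String) (hint : String) : List String :=
  let hint_text := if hint ≠ "" then "\n*" ++ hint ++ "*" else ""
  if lines = [] then
    ["## __" ++ title ++ "__\n*(none)*" ++ hint_text]
  else
    let st := lines.foldl (descA_step title) ([], [], 0, true)
    if st.2.1 ≠ [] then
      let t := if st.2.2.2 then title else title ++ " (cont.)"
      st.1 ++ ["## __" ++ t ++ "__\n" ++ PySem.Str.join "\n" st.2.1 ++ hint_text]
    else st.1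

-- ===== PORT B =====
-- grouping-pass loop body of B; state = (groups, cur, chars)
def descB_step (st : List (List String) × List String × Int) (line : String) :
    List (List String) × List String × Int :=
  let st2 :=
    if st.2.1 ≠ [] ∧ st.2.2 + PySem.Str.len line + 1 > 3500 then
      (st.1 ++ [st.2.1], ([] : List String), (0 : Int))
    else st
  (st2.1, st2.2.1 ++ [line], st2.2.2 + PySem.Str.len line + 1)

-- _render_blocks; the [] case (where Python's groups[0] would raise) is unreachable: B only calls
-- it with nonempty groups
def render_blocks (title : String) (groups : List (List String)) (hint_text : String) (first : Bool) : List String :=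
  match groups with
  | [] => []
  | g :: gs =>
    let head := if first then "## __" ++ title ++ "__\n" else "## __" ++ title ++ " (cont.)__\n"
    let body := head ++ PySem.Str.join "\n" g
    if gs = [] then [body ++ hint_text] else [body] ++ render_blocks title gs hint_text false

def desc_sections_py_alt (title : String) (lines : List String) (hint : String) : List String :=
  let hint_text := if hint ≠ "" then "\n*" ++ hint ++ "*" else ""
  let st := lines.foldl descB_step ([], [], 0)
  let groups := if st.2.1 ≠ [] then st.1 ++ [st.2.1] else st.1
  if groups = [] then
    ["## __" ++ title ++ "__\n*(none)*" ++ hint_text]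
  else
    render_blocks title groups hint_text true

-- ===== PRECONDITION & SPEC =====
def Spec_desc_sections_py (title : String) (lines : List String) (hint : String) (out : List String) : Prop := out = desc_sections_py_alt title lines hint
instance (title : String) (lines : List String) (hint : String) (out : List String) : Decidable (Spec_desc_sections_py title lines hint out) := by unfold Spec_desc_sections_py; infer_instance

-- ===== CLAIM (what is proved, stated in full; the proofs are below) =====
def Claim_equal_desc_sections_py : Prop := ∀ (title : String) (lines : List String) (hint : String), Dom_desc_sections_py title lines hint → Spec_desc_sections_py title lines hint (desc_sections_py title lines hint)

-- ===== LEMMAS AND PROOFS =====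

-- the heading in front of a block
def descHead (title : String) (first : Bool) : String :=
  if first then "## __" ++ title ++ "__\n" else "## __" ++ title ++ " (cont.)__\n"

-- rendering of a list of groups without the hint (what A's blocks list looks like)
def rg (title : String) (first : Bool) : List (List String) → List String
  | [] => []
  | g :: gs => (descHead title first ++ PySem.Str.join "\n" g) :: rg title false gs

lemma rg_append (title : String) (c : List String) :
    ∀ (gs : List (List String)) (first : Bool),
      rg title first (gs ++ [c])
        = rg title first gs ++ [descHead title (first && gs.isEmpty) ++ PySem.Str.join "\n" c]
  | [], first => by simp [rg]
  | g :: gs, first => by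
      simp [rg, rg_append title c gs false]

lemma rb_eq (title hint_text : String) (c : List String) :
    ∀ (gs : List (List String)) (first : Bool),
      render_blocks title (gs ++ [c]) hint_text first
        = rg title first gs
            ++ [descHead title (first && gs.isEmpty) ++ (PySem.Str.join "\n" c ++ hint_text)]
  | [], first => by
      simp [render_blocks, rg, descHead, String.append_assoc]
  | g :: gs, first => by
      simp [render_blocks, rg, rb_eq title hint_text c gs false, descHead]

-- abstraction from B's loop state to A's loop state
def absState (title : String) (st : List (List String) × List String × Int) :
    List String × List String × Int × Bool :=
  (rg title true st.1, st.2.1, st.2.2, st.1.isEmpty)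

lemma step_sim (title line : String) (st : List (List String) × List String × Int) :
    descA_step title (absState title st) line = absState title (descB_step st line) := by
  obtain ⟨groups, cur, chars⟩ := st
  simp only [descA_step, descB_step, absState]
  by_cases hcond : cur ≠ [] ∧ chars + PySem.Str.len line + 1 > 3500
  · rw [if_pos (⟨hcond.2, hcond.1⟩ : chars + PySem.Str.len line + 1 > 3500 ∧ cur ≠ []),
      if_pos hcond]
    by_cases hg : groups = [] <;>
      simp [hg, rg, rg_append, descHead, String.append_assoc]
  · rw [if_neg (fun h => hcond ⟨h.2, h.1⟩), if_neg hcond]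

lemma fold_sim (title : String) :
    ∀ (lines : List String) (st : List (List String) × List String × Int),
      lines.foldl (descA_step title) (absState title st)
        = absState title (lines.foldl descB_step st)
  | [], _ => rfl
  | line :: lines, st => by
      rw [List.foldl_cons, List.foldl_cons, step_sim, fold_sim title lines]

lemma cur_ne_nil :
    ∀ (lines : List String) (st : List (List String) × List String × Int),
      lines ≠ [] ∨ st.2.1 ≠ [] → (lines.foldl descB_step st).2.1 ≠ []
  | [], st, h => h.resolve_left (by simp)
  | line :: lines, st, _ => by
      rw [List.foldl_cons]
      exact cur_ne_nil lines _ (by by_cases h : lines = [] <;> simp [h, descB_step])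

-- ===== VERDICT (by name: the statement is the Claim_ definition above) =====
theorem desc_sections_py_spec : Claim_equal_desc_sections_py := by
  intro title lines hint _
  unfold Spec_desc_sections_py
  by_cases hl : lines = []
  · subst hl; rfl
  · have hsim := fold_sim title lines ([], [], 0)
    have hcur : (lines.foldl descB_step ([], [], 0)).2.1 ≠ [] :=
      cur_ne_nil lines _ (Or.inl hl)
    set st := lines.foldl descB_step ([], [], 0) with hst
    have habs : absState title ([], [], 0) = ([], [], 0, true) := rfl
    rw [habs] at hsim
    have hne : (st.1 ++ [st.2.1]) ≠ [] := by simp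
    simp only [desc_sections_py, desc_sections_py_alt, ← hst, hsim, absState]
    rw [if_neg hl, if_pos hcur, if_pos hcur, if_neg hne, rb_eq]
    by_cases hg : st.1 = [] <;> simp [hg, descHead, String.append_assoc]
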